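-- pv_equiv track=rewrite | github.com/tri2820/KnightTour_Linear | engine.py | getPointGridAttribute
-- ===== SOURCE A (Python) =====
-- def getPointGridAttribute(n,x,y):
--     # If the input board is already an atomic one
--     # then just returns it
--     if n < 12:
--         return 8, n, n, x, y
--
--     # Set initial variables for divide-and-conquer
--     gridSizeX = n
--     gridSizeY = n
--     gridLocX = x
--     gridLocY = y
--     pointAttribute = 8
--
--     # Divide-and-conquer loop
--     while True:
--         # Along x axis
--         # Divide the board into half
--         halve = gridSizeX // 2
--         mod_ = halve % 2
--         left = halve - mod_
--         right = halve + mod_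
--         # Find the local board size
--         # Find the local projection (x-axis wise) of the current position
--         # Record choice in temporary variable blkChoiceX
--         if gridLocX < left:
--             gridSizeX = left
--             blkChoiceX = 1
--         else:
--             gridSizeX = right
--             gridLocX -= left
--             blkChoiceX = 2
--
--         # Along y axis
--         # Divide the board into half
--         halve = gridSizeY // 2
--         mod_ = halve % 2
--         left = halve - mod_
--         right = halve + mod_
--         # Find the local board size
--         # Find the local projection (y-axis wise) of the current position
--         # Record choice in temporary variable blkChoiceY
--         if gridLocY < left:
--             gridSizeY = left
--             blkChoiceY = 1
--         else:
--             gridSizeY = right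
--             gridLocY -= left
--             blkChoiceY = 2
--
--         # Assign corresponding attribute based on which corner it is
--         pointAttribute = \
--             0 if blkChoiceX == 1 and blkChoiceY == 1 and gridLocX == gridSizeX - 3 and gridLocY == gridSizeY - 1 else \
--             1 if blkChoiceX == 1 and blkChoiceY == 1 and gridLocX == gridSizeX - 1 and gridLocY == gridSizeY - 2 else \
--             2 if blkChoiceX == 2 and blkChoiceY == 1 and gridLocX ==  1            and gridLocY == gridSizeY - 3 else \
--             3 if blkChoiceX == 2 and blkChoiceY == 1 and gridLocX ==  0            and gridLocY == gridSizeY - 1 else \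
--             4 if blkChoiceX == 2 and blkChoiceY == 2 and gridLocX ==  2            and gridLocY == 0 else \
--             5 if blkChoiceX == 2 and blkChoiceY == 2 and gridLocX ==  0            and gridLocY == 1 else \
--             6 if blkChoiceX == 1 and blkChoiceY == 2 and gridLocX == gridSizeX - 2 and gridLocY == 2 else \
--             7 if blkChoiceX == 1 and blkChoiceY == 2 and gridLocX == gridSizeX - 1 and gridLocY == 0 else \
--             pointAttribute
--
--         # Stop the loop if the board is already atomic
--         if ((gridSizeX <= 12 and gridSizeY <= 12) and (gridSizeX < 12 or gridSizeY < 12)): break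
--
--     return pointAttribute, gridSizeX, gridSizeY, gridLocX, gridLocY
-- ===== SOURCE B (Python) =====
-- def getPointGridAttribute(n, x, y):
--     # atomic board: return directly
--     if n < 12:
--         return 8, n, n, x, y
--
--     def split(size, loc):
--         # halve one axis; returns (sub-board size, local coordinate, 0=first/1=second block)
--         half = size // 2
--         m = half % 2
--         lo = half - m
--         if loc < lo:
--             return lo, loc, 0
--         return half + m, loc - lo, 1
--
--     # data-driven corner table: (blockX, blockY, expected local x, expected local y, attribute)
--     def corner(attr, sX, sY, lX, lY, cX, cY):
--         table = [
--             (0, 0, sX - 3, sY - 1, 0),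
--             (0, 0, sX - 1, sY - 2, 1),
--             (1, 0, 1,      sY - 3, 2),
--             (1, 0, 0,      sY - 1, 3),
--             (1, 1, 2,      0,      4),
--             (1, 1, 0,      1,      5),
--             (0, 1, sX - 2, 2,      6),
--             (0, 1, sX - 1, 0,      7),
--         ]
--         for (bx, by, ex, ey, a) in table:
--             if cX == bx and cY == by and lX == ex and lY == ey:
--                 return a
--         return attr
--
--     def go(attr, sX, sY, lX, lY):
--         sX2, lX2, cX = split(sX, lX)
--         sY2, lY2, cY = split(sY, lY)
--         attr2 = corner(attr, sX2, sY2, lX2, lY2, cX, cY)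
--         if sX2 <= 12 and sY2 <= 12 and (sX2 < 12 or sY2 < 12):
--             return attr2, sX2, sY2, lX2, lY2
--         return go(attr2, sX2, sY2, lX2, lY2)
--
--     return go(8, n, n, x, y)
-- ===== Notes on version B (the rewrite author's own statement) =====
-- stated objective: alternative
-- what changed: The while-True loop with duplicated inline x/y halving code and an 8-way conditional-expression chain is re-decomposed into a recursive helper threading the attribute as an accumulator, with one shared axis-splitting helper used for both axes and a data-driven corner table scanned for the first match.
import Mathlib
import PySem

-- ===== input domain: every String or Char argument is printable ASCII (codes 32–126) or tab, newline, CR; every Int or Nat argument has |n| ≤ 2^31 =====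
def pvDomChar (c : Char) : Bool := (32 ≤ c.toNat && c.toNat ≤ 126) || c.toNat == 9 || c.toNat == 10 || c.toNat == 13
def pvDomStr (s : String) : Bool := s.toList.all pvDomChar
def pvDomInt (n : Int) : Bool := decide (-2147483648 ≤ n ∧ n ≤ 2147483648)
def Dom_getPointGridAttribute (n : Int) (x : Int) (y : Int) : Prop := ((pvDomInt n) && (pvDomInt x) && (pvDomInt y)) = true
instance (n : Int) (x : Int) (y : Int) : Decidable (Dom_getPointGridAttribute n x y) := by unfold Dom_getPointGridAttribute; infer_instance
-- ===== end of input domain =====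

-- B re-decomposes A's while-True loop: a shared axis-splitting helper, a data-driven
-- corner table scanned for the first match, and recursion threading the attribute
-- (objective: alternative decomposition; same cost).
-- Both loop ports carry a fuel totality guard (the loop's measure strictly decreases, so the
-- wrappers' fuel n.toNat + n.toNat + 1 is never exhausted; fuel 0 returns the current state).

-- ===== PORT A =====
-- A's divide-and-conquer while-True loop, state (gridSizeX, gridSizeY, gridLocX, gridLocY, pointAttribute)
def pvLoopA (fuel : Nat) (gX gY lX lY attr : Int) : Int × Int × Int × Int × Int :=
  match fuel with
  | 0 => (attr, gX, gY, lX, lY)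
  | fuel + 1 =>
    let halveX := PySem.Int.floordiv gX 2
    let modX := PySem.Int.mod halveX 2
    let leftX := halveX - modX
    let rightX := halveX + modX
    let sX : Int := if lX < leftX then leftX else rightX
    let lX' : Int := if lX < leftX then lX else lX - leftX
    let bX : Int := if lX < leftX then 1 else 2
    let halveY := PySem.Int.floordiv gY 2
    let modY := PySem.Int.mod halveY 2
    let leftY := halveY - modY
    let rightY := halveY + modY
    let sY : Int := if lY < leftY then leftY else rightY
    let lY' : Int := if lY < leftY then lY else lY - leftY
    let bY : Int := if lY < leftY then 1 else 2
    let attr' : Int :=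
      if bX = 1 ∧ bY = 1 ∧ lX' = sX - 3 ∧ lY' = sY - 1 then 0
      else if bX = 1 ∧ bY = 1 ∧ lX' = sX - 1 ∧ lY' = sY - 2 then 1
      else if bX = 2 ∧ bY = 1 ∧ lX' = 1 ∧ lY' = sY - 3 then 2
      else if bX = 2 ∧ bY = 1 ∧ lX' = 0 ∧ lY' = sY - 1 then 3
      else if bX = 2 ∧ bY = 2 ∧ lX' = 2 ∧ lY' = 0 then 4
      else if bX = 2 ∧ bY = 2 ∧ lX' = 0 ∧ lY' = 1 then 5
      else if bX = 1 ∧ bY = 2 ∧ lX' = sX - 2 ∧ lY' = 2 then 6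
      else if bX = 1 ∧ bY = 2 ∧ lX' = sX - 1 ∧ lY' = 0 then 7
      else attr
    if sX ≤ 12 ∧ sY ≤ 12 ∧ (sX < 12 ∨ sY < 12) then (attr', sX, sY, lX', lY')
    else pvLoopA fuel sX sY lX' lY' attr'

def getPointGridAttribute (n : Int) (x : Int) (y : Int) : Int × Int × Int × Int × Int :=
  if n < 12 then (8, n, n, x, y)
  else pvLoopA (n.toNat + n.toNat + 1) n n x y 8

-- ===== PORT B =====
-- halve one axis: (sub-board size, local coordinate, 0 = first block / 1 = second block)
def pvSplitB (size loc : Int) : Int × Int × Int :=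
  let half := PySem.Int.floordiv size 2
  let m := PySem.Int.mod half 2
  let lo := half - m
  if loc < lo then (lo, loc, 0) else (half + m, loc - lo, 1)

-- first matching row of the corner table, else the carried attribute
def pvFirstMatch (attr lX lY cX cY : Int) : List (Int × Int × Int × Int × Int) → Int
  | [] => attr
  | (bx, byy, ex, ey, a) :: rest =>
      if cX = bx ∧ cY = byy ∧ lX = ex ∧ lY = ey then a
      else pvFirstMatch attr lX lY cX cY rest

def pvCornerB (attr sX sY lX lY cX cY : Int) : Int :=
  pvFirstMatch attr lX lY cX cY
    [(0, 0, sX - 3, sY - 1, 0),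
     (0, 0, sX - 1, sY - 2, 1),
     (1, 0, 1,      sY - 3, 2),
     (1, 0, 0,      sY - 1, 3),
     (1, 1, 2,      0,      4),
     (1, 1, 0,      1,      5),
     (0, 1, sX - 2, 2,      6),
     (0, 1, sX - 1, 0,      7)]

def pvGoB (fuel : Nat) (attr sX sY lX lY : Int) : Int × Int × Int × Int × Int :=
  match fuel with
  | 0 => (attr, sX, sY, lX, lY)
  | fuel + 1 =>
    let p := pvSplitB sX lX
    let q := pvSplitB sY lY
    let attr2 := pvCornerB attr p.1 q.1 p.2.1 q.2.1 p.2.2 q.2.2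
    if p.1 ≤ 12 ∧ q.1 ≤ 12 ∧ (p.1 < 12 ∨ q.1 < 12) then (attr2, p.1, q.1, p.2.1, q.2.1)
    else pvGoB fuel attr2 p.1 q.1 p.2.1 q.2.1

def getPointGridAttribute_alt (n : Int) (x : Int) (y : Int) : Int × Int × Int × Int × Int :=
  if n < 12 then (8, n, n, x, y)
  else pvGoB (n.toNat + n.toNat + 1) 8 n n x y

-- ===== PRECONDITION & SPEC =====
def Spec_getPointGridAttribute (n : Int) (x : Int) (y : Int) (out : Int × Int × Int × Int × Int) : Prop := out = getPointGridAttribute_alt n x y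
instance (n : Int) (x : Int) (y : Int) (out : Int × Int × Int × Int × Int) : Decidable (Spec_getPointGridAttribute n x y out) := by unfold Spec_getPointGridAttribute; infer_instance

-- ===== CLAIM (what is proved, stated in full; the proofs are below) =====
def Claim_equal_getPointGridAttribute : Prop := ∀ (n : Int) (x : Int) (y : Int), Dom_getPointGridAttribute n x y → Spec_getPointGridAttribute n x y (getPointGridAttribute n x y)

-- ===== LEMMAS AND PROOFS =====
lemma pvLoop_eq_go (fuel : Nat) : ∀ (gX gY lX lY attr : Int),
    pvLoopA fuel gX gY lX lY attr = pvGoB fuel attr gX gY lX lY := by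
  induction fuel with
  | zero => intro gX gY lX lY attr; rfl
  | succ fuel IH =>
    intro gX gY lX lY attr
    rw [pvLoopA, pvGoB]
    have h1 : PySem.Int.floordiv gX 2 = gX / 2 := PySem.Int.floordiv_eq_ediv_of_pos (by norm_num)
    have h2 : PySem.Int.mod (gX / 2) 2 = gX / 2 % 2 := PySem.Int.mod_eq_emod_of_pos (by norm_num)
    have h3 : PySem.Int.floordiv gY 2 = gY / 2 := PySem.Int.floordiv_eq_ediv_of_pos (by norm_num)
    have h4 : PySem.Int.mod (gY / 2) 2 = gY / 2 % 2 := PySem.Int.mod_eq_emod_of_pos (by norm_num)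
    simp only [h1, h2, h3, h4]
    by_cases hx : lX < gX / 2 - gX / 2 % 2 <;> by_cases hy : lY < gY / 2 - gY / 2 % 2 <;>
      simp [pvSplitB, pvCornerB, pvFirstMatch, hx, hy] <;>
      split_ifs with hb <;>
      first
        | rfl
        | exact IH _ _ _ _ _

-- ===== VERDICT (by name: the statement is the Claim_ definition above) =====
theorem getPointGridAttribute_spec : Claim_equal_getPointGridAttribute := by
  intro n x y _
  unfold Spec_getPointGridAttribute getPointGridAttribute getPointGridAttribute_alt
  split_ifs with h
  · rfl
  · exact pvLoop_eq_go (n.toNat + n.toNat + 1) n n x y 8
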